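-- pv_equiv track=rewrite | github.com/dahat64/GMmoves | helper.py | getfirstword
-- ===== SOURCE A (Python) =====
-- def getfirstword(str):
--     upper = 0
--     firstword = ""
--     for char in str:
--         if char.isupper() == True:
--             upper += 1
--             if upper == 2:
--                 return firstword
--             firstword += char
--         else:
--             if char == "," or char == " ":
--                 return firstword
--             firstword += char
--     return firstword
-- ===== SOURCE B (Python) =====
-- def getfirstword(str):
--     ups = [i for i, c in enumerate(str) if c.isupper()]
--     second_upper = ups[1] if len(ups) > 1 else len(str)
--     delim = next((i for i, c in enumerate(str) if c in ", "), len(str))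
--     return str[:min(second_upper, delim)]
-- ===== Notes on version B (the rewrite author's own statement) =====
-- stated objective: simpler
-- what changed: Replaced the accumulate-and-early-return loop (counter plus growing string) by two independent boundary searches -- the index of the second uppercase letter and the index of the first delimiter (comma or space), each defaulting to the string length -- combined with min and a single slice.
import Mathlib
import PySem

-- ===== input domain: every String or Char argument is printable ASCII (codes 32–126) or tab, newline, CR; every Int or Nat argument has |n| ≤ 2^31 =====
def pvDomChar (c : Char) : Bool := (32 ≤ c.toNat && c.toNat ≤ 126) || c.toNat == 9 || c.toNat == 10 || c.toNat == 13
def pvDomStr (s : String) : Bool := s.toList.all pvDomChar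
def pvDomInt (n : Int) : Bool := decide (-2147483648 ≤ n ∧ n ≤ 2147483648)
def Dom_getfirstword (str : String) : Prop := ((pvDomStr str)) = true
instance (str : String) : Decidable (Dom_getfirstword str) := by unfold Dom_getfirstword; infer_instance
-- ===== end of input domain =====

-- B replaces A's accumulate-and-early-return loop by two independent boundary
-- searches (index of the second uppercase letter; index of the first ',' or ' ')
-- combined with min and a single slice (objective: simpler decomposition).

-- ===== PORT A =====
-- A's loop: counts uppercase letters, accumulates chars, early-returns on the
-- second uppercase or on the first ',' or ' '.
def pvLoopA : List Char → Nat → List Char → List Char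
  | [], _, acc => acc
  | c :: rest, upper, acc =>
    if PySem.Chars.isupper c then
      if upper + 1 == 2 then acc
      else pvLoopA rest (upper + 1) (acc ++ [c])
    else
      if c == ',' || c == ' ' then acc
      else pvLoopA rest upper (acc ++ [c])

def getfirstword (str : String) : String := String.mk (pvLoopA str.toList 0 [])

-- ===== PORT B =====
def getfirstword_alt (str : String) : String :=
  let l := str.toList
  let ups := ((PySem.List.enumerate l).filter
      (fun p => PySem.Chars.isupper p.2)).map Prod.fst
  let secondUpper : Int :=
    if h : 1 < ups.length then ups[1] else (l.length : Int)
  let delim : Int :=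
    (((PySem.List.enumerate l).find?
        (fun p => p.2 == ',' || p.2 == ' ')).map Prod.fst).getD (l.length : Int)
  String.mk (PySem.List.slice l none (some (min secondUpper delim)))

-- ===== PRECONDITION & SPEC =====
def Spec_getfirstword (str : String) (out : String) : Prop := out = getfirstword_alt str
instance (str : String) (out : String) : Decidable (Spec_getfirstword str out) := by unfold Spec_getfirstword; infer_instance

-- ===== CLAIM (what is proved, stated in full; the proofs are below) =====
def Claim_equal_getfirstword : Prop := ∀ (str : String), Dom_getfirstword str → Spec_getfirstword str (getfirstword str)

-- ===== LEMMAS AND PROOFS =====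

-- Proof helpers: index of the first delimiter / first uppercase / second
-- uppercase character of a list, each defaulting to the list's length.
def pvFd : List Char → Nat
  | [] => 0
  | c :: r => if c == ',' || c == ' ' then 0 else pvFd r + 1

def pvFu : List Char → Nat
  | [] => 0
  | c :: r => if PySem.Chars.isupper c then 0 else pvFu r + 1

def pvSu : List Char → Nat
  | [] => 0
  | c :: r => if PySem.Chars.isupper c then pvFu r + 1 else pvSu r + 1

lemma pvMinSucc (a b : Nat) : min (a + 1) (b + 1) = min a b + 1 := by omega

lemma pvFd_le (l : List Char) : pvFd l ≤ l.length := by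
  induction l with
  | nil => simp [pvFd]
  | cons c r ih => simp only [pvFd, List.length_cons]; split <;> omega

lemma pvFu_le (l : List Char) : pvFu l ≤ l.length := by
  induction l with
  | nil => simp [pvFu]
  | cons c r ih => simp only [pvFu, List.length_cons]; split <;> omega

lemma pvSu_le (l : List Char) : pvSu l ≤ l.length := by
  induction l with
  | nil => simp [pvSu]
  | cons c r ih =>
    simp only [pvSu, List.length_cons]
    have := pvFu_le r
    split <;> omega

lemma upper_not_delim (c : Char) (h : PySem.Chars.isupper c = true) :
    (c == ',' || c == ' ') = false := by
  simp only [PySem.Chars.isupper, Bool.and_eq_true, decide_eq_true_eq] at h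
  have h1 : ('A' : Char) ≤ c := h.1
  have h2 : c ≤ ('Z' : Char) := h.2
  simp only [Char.le_def] at h1 h2
  simp only [Bool.or_eq_false_iff, beq_eq_false_iff_ne, ne_eq]
  constructor <;> rintro rfl <;> simp_all

-- A's loop with counter 1 stops at the first uppercase or first delimiter.
lemma pvLoopA_one (l : List Char) : ∀ acc,
    pvLoopA l 1 acc = acc ++ l.take (min (pvFu l) (pvFd l)) := by
  induction l with
  | nil => intro acc; simp [pvLoopA]
  | cons c r ih =>
    intro acc
    by_cases hu : PySem.Chars.isupper c = true
    · simp [pvLoopA, hu, pvFu]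
    · have hd : (c == ',' || c == ' ') = true ∨ (c == ',' || c == ' ') = false := by
        cases (c == ',' || c == ' ') <;> simp
      rcases hd with hd | hd
      · simp [pvLoopA, hu, hd, pvFd]
      · simp only [pvLoopA, hu, hd, if_false, Bool.false_eq_true, ih]
        simp [pvFu, pvFd, hu, hd, pvMinSucc, List.take_succ_cons]

-- A's loop with counter 0 stops at the second uppercase or first delimiter.
lemma pvLoopA_zero (l : List Char) : ∀ acc,
    pvLoopA l 0 acc = acc ++ l.take (min (pvSu l) (pvFd l)) := by
  induction l with
  | nil => intro acc; simp [pvLoopA]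
  | cons c r ih =>
    intro acc
    by_cases hu : PySem.Chars.isupper c = true
    · have hd := upper_not_delim c hu
      simp only [pvLoopA, hu, if_true, show (0 + 1 == 2) = false by decide,
        Bool.false_eq_true, if_false]
      rw [pvLoopA_one]
      simp [pvSu, pvFd, hu, hd, pvMinSucc, List.take_succ_cons]
    · have hd : (c == ',' || c == ' ') = true ∨ (c == ',' || c == ' ') = false := by
        cases (c == ',' || c == ' ') <;> simp
      rcases hd with hd | hd
      · simp [pvLoopA, hu, hd, pvFd]
      · simp only [pvLoopA, hu, hd, if_false, Bool.false_eq_true, ih]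
        simp [pvSu, pvFd, hu, hd, pvMinSucc, List.take_succ_cons]

-- The uppercase-position list built by B from enumerate.
def pvUps (l : List Char) (s : Int) : List Int :=
  ((PySem.List.enumerate l s).filter (fun p => PySem.Chars.isupper p.2)).map Prod.fst

lemma pvUps_cons (c : Char) (r : List Char) (s : Int) :
    pvUps (c :: r) s =
      if PySem.Chars.isupper c then s :: pvUps r (s + 1) else pvUps r (s + 1) := by
  simp only [pvUps, PySem.List.enumerate_cons, List.filter_cons]
  split <;> simp_all

lemma pvUps_len0 (l : List Char) : ∀ s : Int,
    (0 < (pvUps l s).length ↔ pvFu l < l.length) ∧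
    (pvFu l < l.length → (pvUps l s)[0]? = some (s + pvFu l)) := by
  induction l with
  | nil => intro s; simp [pvUps, PySem.List.enumerate, pvFu]
  | cons c r ih =>
    intro s
    rw [pvUps_cons]
    by_cases hu : PySem.Chars.isupper c = true
    · simp [hu, pvFu]
    · have h := ih (s + 1)
      simp only [hu, Bool.false_eq_true, if_false, pvFu, List.length_cons]
      constructor
      · rw [h.1]; omega
      · intro hlt
        rw [h.2 (by omega)]
        congr 1
        push_cast
        ring

lemma pvUps_len1 (l : List Char) : ∀ s : Int,
    (1 < (pvUps l s).length ↔ pvSu l < l.length) ∧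
    (pvSu l < l.length → (pvUps l s)[1]? = some (s + pvSu l)) := by
  induction l with
  | nil => intro s; simp [pvUps, PySem.List.enumerate, pvSu]
  | cons c r ih =>
    intro s
    rw [pvUps_cons]
    by_cases hu : PySem.Chars.isupper c = true
    · have h := pvUps_len0 r (s + 1)
      simp only [hu, if_true, pvSu, List.length_cons, List.length_cons]
      constructor
      · simpa using h.1
      · intro hlt
        have := h.2 (by omega)
        simp [this]
        ring
    · have h := ih (s + 1)
      simp only [hu, Bool.false_eq_true, if_false, pvSu, List.length_cons]
      constructor
      · rw [h.1]; omega
      · intro hlt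
        rw [h.2 (by omega)]
        congr 1
        push_cast
        ring

lemma find_delim (l : List Char) : ∀ s : Int,
    (((PySem.List.enumerate l s).find? (fun p => p.2 == ',' || p.2 == ' ')).map
        Prod.fst)
      = if pvFd l < l.length then some (s + pvFd l) else none := by
  induction l with
  | nil => intro s; simp [PySem.List.enumerate, pvFd]
  | cons c r ih =>
    intro s
    simp only [PySem.List.enumerate_cons, List.find?_cons]
    by_cases hd : (c == ',' || c == ' ') = true
    · simp [hd, pvFd]
    · have h := ih (s + 1)
      simp only [hd, pvFd, List.length_cons]
      split
      · simp_all
      · rw [h]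
        split
        · rename_i h1 h2
          split
          · congr 1; push_cast; ring
          · omega
        · rename_i h1 h2
          split
          · omega
          · rfl

lemma alt_eq_take (str : String) :
    getfirstword_alt str
      = String.mk (str.toList.take (min (pvSu str.toList) (pvFd str.toList))) := by
  unfold getfirstword_alt
  set l := str.toList with hl
  dsimp only
  have hfoldU : ((PySem.List.enumerate l).filter
      (fun p => PySem.Chars.isupper p.2)).map Prod.fst = pvUps l 0 := rfl
  rw [hfoldU]
  have hlen1 := (pvUps_len1 l 0).1
  have hget1 := (pvUps_len1 l 0).2
  have hfd := find_delim l 0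
  have hsu : (if h : 1 < (pvUps l 0).length
        then (pvUps l 0)[1] else (l.length : Int)) = (pvSu l : Int) := by
    split
    · rename_i h
      have hlt : pvSu l < l.length := hlen1.mp h
      have := hget1 hlt
      have hg : (pvUps l 0)[1]? = some ((pvUps l 0)[1]) := List.getElem?_eq_getElem h
      rw [hg] at this
      simp only [Option.some.injEq] at this
      rw [this]; ring
    · rename_i h
      have : ¬ pvSu l < l.length := fun hlt => h (hlen1.mpr hlt)
      have hle := pvSu_le l
      have : pvSu l = l.length := by omega
      simp [this]
  have hde : ((((PySem.List.enumerate l).find?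
        (fun p => p.2 == ',' || p.2 == ' ')).map Prod.fst).getD (l.length : Int))
      = (pvFd l : Int) := by
    rw [hfd]
    split
    · simp
    · rename_i h
      have hle := pvFd_le l
      have : pvFd l = l.length := by omega
      simp [this]
  show String.mk (PySem.List.slice l none (some (min _ _))) = _
  rw [hsu, hde]
  rw [PySem.List.slice_to l (by positivity)]
  congr 2
  omega

-- ===== VERDICT (by name: the statement is the Claim_ definition above) =====
theorem getfirstword_spec : Claim_equal_getfirstword := by
  intro str _
  show getfirstword str = getfirstword_alt str
  rw [alt_eq_take, getfirstword, pvLoopA_zero]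
  simp
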